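-- pv_equiv track=rewrite | github.com/MrBrantCode/unitest_baseline | mut_generate/mist_train_cf/cf_56175/solution.py | categorize_strings
-- ===== SOURCE A (Python) =====
-- def categorize_strings(lst, pattern):
--     result = {"short": [], "long": [], "pattern-matched": []}
--     for s in lst:
--         if pattern in s:
--             result["pattern-matched"].append(s)
--         elif len(s) < 5:
--             result["short"].append(s)
--         else:
--             result["long"].append(s)
--     return result
-- ===== SOURCE B (Python) =====
-- def categorize_strings(lst, pattern):
--     return {
--         "short": [s for s in lst if pattern not in s and len(s) < 5],
--         "long": [s for s in lst if pattern not in s and len(s) >= 5],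
--         "pattern-matched": [s for s in lst if pattern in s],
--     }
-- ===== Notes on version B (the rewrite author's own statement) =====
-- stated objective: simpler
-- what changed: Replaces the single branching loop that appends into a mutable dict with three independent filtered comprehensions, one per bucket, built directly into the result dict literal.
import Mathlib
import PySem

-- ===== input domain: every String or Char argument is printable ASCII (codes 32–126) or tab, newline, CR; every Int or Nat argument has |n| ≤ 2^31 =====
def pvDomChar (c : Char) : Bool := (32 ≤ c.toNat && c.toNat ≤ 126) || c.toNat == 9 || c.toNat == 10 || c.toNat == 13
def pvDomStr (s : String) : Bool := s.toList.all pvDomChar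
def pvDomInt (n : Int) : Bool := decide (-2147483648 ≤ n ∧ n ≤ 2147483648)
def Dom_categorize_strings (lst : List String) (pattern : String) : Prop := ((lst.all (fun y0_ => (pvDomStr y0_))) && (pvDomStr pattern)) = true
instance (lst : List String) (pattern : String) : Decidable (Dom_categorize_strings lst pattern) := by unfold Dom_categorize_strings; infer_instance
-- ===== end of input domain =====

-- B builds the result dict from three independent filtered passes instead of A's single branching loop (objective: simpler).

-- ===== PORT A =====
def categorize_strings (lst : List String) (pattern : String) : List (String × List String) :=
  let result : PySem.Dict String (List String) :=
    PySem.Dict.mk [("short", []), ("long", []), ("pattern-matched", [])]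
  (lst.foldl (fun result s =>
    if PySem.Str.isIn pattern s then
      PySem.Dict.modify result "pattern-matched" [] (· ++ [s])
    else if PySem.Str.len s < 5 then
      PySem.Dict.modify result "short" [] (· ++ [s])
    else
      PySem.Dict.modify result "long" [] (· ++ [s])) result).items

-- ===== PORT B =====
def categorize_strings_alt (lst : List String) (pattern : String) : List (String × List String) :=
  [("short", lst.filter (fun s => !PySem.Str.isIn pattern s && PySem.Str.len s < 5)),
   ("long", lst.filter (fun s => !PySem.Str.isIn pattern s && !(PySem.Str.len s < 5))),
   ("pattern-matched", lst.filter (fun s => PySem.Str.isIn pattern s))]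

-- ===== PRECONDITION & SPEC =====
def Spec_categorize_strings (lst : List String) (pattern : String) (out : List (String × List String)) : Prop := out = categorize_strings_alt lst pattern
instance (lst : List String) (pattern : String) (out : List (String × List String)) : Decidable (Spec_categorize_strings lst pattern out) := by unfold Spec_categorize_strings; infer_instance

-- ===== CLAIM (what is proved, stated in full; the proofs are below) =====
def Claim_equal_categorize_strings : Prop := ∀ (lst : List String) (pattern : String), Dom_categorize_strings lst pattern → Spec_categorize_strings lst pattern (categorize_strings lst pattern)

-- ===== LEMMAS AND PROOFS =====

-- Computing Dict.modify on the fixed three-key accumulator, one lemma per key.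
theorem modify_pm (a b c : List String) (x : String) :
    PySem.Dict.modify (PySem.Dict.mk [("short", a), ("long", b), ("pattern-matched", c)])
      "pattern-matched" [] (· ++ [x]) =
    PySem.Dict.mk [("short", a), ("long", b), ("pattern-matched", c ++ [x])] := by
  simp [PySem.Dict.modify, PySem.Dict.contains, PySem.Dict.get?, PySem.Dict.getD,
    PySem.Dict.insert]

theorem modify_short (a b c : List String) (x : String) :
    PySem.Dict.modify (PySem.Dict.mk [("short", a), ("long", b), ("pattern-matched", c)])
      "short" [] (· ++ [x]) =
    PySem.Dict.mk [("short", a ++ [x]), ("long", b), ("pattern-matched", c)] := by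
  simp [PySem.Dict.modify, PySem.Dict.contains, PySem.Dict.get?, PySem.Dict.getD,
    PySem.Dict.insert]

theorem modify_long (a b c : List String) (x : String) :
    PySem.Dict.modify (PySem.Dict.mk [("short", a), ("long", b), ("pattern-matched", c)])
      "long" [] (· ++ [x]) =
    PySem.Dict.mk [("short", a), ("long", b ++ [x]), ("pattern-matched", c)] := by
  simp [PySem.Dict.modify, PySem.Dict.contains, PySem.Dict.get?, PySem.Dict.getD,
    PySem.Dict.insert]

-- Loop invariant: A's fold over any accumulator of the fixed three-key shape appends the three filters.
theorem categorize_strings_inv (pattern : String) (lst : List String) (a b c : List String) :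
    lst.foldl (fun result s =>
      if PySem.Str.isIn pattern s then
        PySem.Dict.modify result "pattern-matched" [] (· ++ [s])
      else if PySem.Str.len s < 5 then
        PySem.Dict.modify result "short" [] (· ++ [s])
      else
        PySem.Dict.modify result "long" [] (· ++ [s]))
      (PySem.Dict.mk [("short", a), ("long", b), ("pattern-matched", c)]) =
    PySem.Dict.mk
    [("short", a ++ lst.filter (fun s => !PySem.Str.isIn pattern s && PySem.Str.len s < 5)),
     ("long", b ++ lst.filter (fun s => !PySem.Str.isIn pattern s && !(PySem.Str.len s < 5))),
     ("pattern-matched", c ++ lst.filter (fun s => PySem.Str.isIn pattern s))] := by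
  induction lst generalizing a b c with
  | nil => simp
  | cons s rest ih =>
    rw [List.foldl_cons]
    by_cases hp : PySem.Str.isIn pattern s
    · rw [if_pos hp, modify_pm, ih]
      simp_all
    · by_cases hl : PySem.Str.len s < 5
      · rw [if_neg hp, if_pos hl, modify_short, ih]
        simp_all
      · rw [if_neg hp, if_neg hl, modify_long, ih]
        simp_all

-- ===== VERDICT (by name: the statement is the Claim_ definition above) =====
theorem categorize_strings_spec : Claim_equal_categorize_strings := by
  intro lst pattern _
  show _ = _
  simp only [categorize_strings, categorize_strings_alt,
    categorize_strings_inv pattern lst [] [] []]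
  rfl
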